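-- pv_equiv track=rewrite | github.com/SirHawbly/MESA_Everyday_Webapp | MESAeveryday/calendar_events.py | get_mesa_events
-- ===== SOURCE A (Python) =====
-- BADGE_COLORS = {
--                 # '3' : 'mauve un-named badge', # Purple (!MESA)
--                 '6' : 'MESA Expert', # Orange
--                 '8' : 'Career Pro', # Grey
--                 '9' : 'College Knowledge', # Blue
--                 '10' : 'Professional Development', # Green
--                 # '11' : 'red un-named badge', # Red (!MESA)
--                 # '12' : 'light grey un-named badge', # No Light Grey
--                }
--
-- BADGE_IDS = {
--              # '3' : 'mauve un-named badge', # Purple (!MESA)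
--              '6' : 4, # Orange
--              '8' : 2, # Grey
--              '9' : 1, # Blue
--              '10' : 3, # Green
--              # '11' : 'red un-named badge', # Red (!MESA)
--              # '12' : 'light grey un-named badge', # No Light Grey
--             }
--
-- def get_mesa_events(events):
--     """
--     parses a list of events and pulls any events that
--     are a mesa badge color into a list of the different
--     types of badges.
--         input:
--             [[event], [event1], [event2]]
--             * event1['colorId'] = 9 *
--             * CAL_COLORS[9] = Blue *
--             * BADGE_IDS[9] = 5 (College Knowledge) *
--
--         output:
--             ['5':[event1], '':[], ...]
--     """
--
--     # # make a empty dictionary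
--     MESA_EVENTS = {}
--
--     # # fill it with empty lists under the different
--     # # badge names (ie. {'MESA Expert'=[], } )
--     for key in BADGE_IDS:
--         MESA_EVENTS[BADGE_IDS[key]] = []
--
--     # # tie the different events with their colors
--     # # to their different badges in the dictionary
--     for event in events:
--         if 'colorId' in event:
--             if event['colorId'] in BADGE_COLORS:
--                 etype = BADGE_IDS[event['colorId']]
--                 MESA_EVENTS[etype] += [event]
--
--
--     # # return the dictionary
--     return MESA_EVENTS
-- ===== SOURCE B (Python) =====
-- BADGE_COLORS = {
--                 '6' : 'MESA Expert', # Orange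
--                 '8' : 'Career Pro', # Grey
--                 '9' : 'College Knowledge', # Blue
--                 '10' : 'Professional Development', # Green
--                }
--
-- BADGE_IDS = {
--              '6' : 4, # Orange
--              '8' : 2, # Grey
--              '9' : 1, # Blue
--              '10' : 3, # Green
--             }
--
-- def get_mesa_events(events):
--     # One bucket per badge id: a per-badge filtering pass over the events list.
--     return {bid: [e for e in events
--                   if e.get('colorId') in BADGE_COLORS and BADGE_IDS[e['colorId']] == bid]
--             for bid in BADGE_IDS.values()}
-- ===== Notes on version B (the rewrite author's own statement) =====
-- stated objective: alternative
-- what changed: A makes one dispatch pass over events, mutating a dict of four buckets per event; B builds the result as a dict comprehension with one per-badge filtering pass over events for each of the four badge ids.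
import Mathlib
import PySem

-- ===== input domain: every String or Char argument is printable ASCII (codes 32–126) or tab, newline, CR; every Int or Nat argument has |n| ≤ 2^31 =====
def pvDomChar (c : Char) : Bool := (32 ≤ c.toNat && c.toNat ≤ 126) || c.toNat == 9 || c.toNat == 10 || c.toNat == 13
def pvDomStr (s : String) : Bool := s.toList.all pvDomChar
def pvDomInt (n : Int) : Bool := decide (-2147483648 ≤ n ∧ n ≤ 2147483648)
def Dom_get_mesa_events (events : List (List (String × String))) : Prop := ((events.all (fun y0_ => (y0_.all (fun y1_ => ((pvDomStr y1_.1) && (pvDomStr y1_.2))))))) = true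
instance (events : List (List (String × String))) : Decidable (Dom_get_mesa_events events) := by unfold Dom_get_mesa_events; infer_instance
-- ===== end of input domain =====

-- B replaces A's single dispatch pass (dict of buckets mutated per event) by one
-- per-badge filtering pass over the events list; objective: alternative decomposition.

-- ===== PORT A =====
def pvBADGE_COLORS : PySem.Dict String String :=
  PySem.Dict.mk [("6", "MESA Expert"), ("8", "Career Pro"),
                 ("9", "College Knowledge"), ("10", "Professional Development")]

def pvBADGE_IDS : PySem.Dict String Int :=
  PySem.Dict.mk [("6", 4), ("8", 2), ("9", 1), ("10", 3)]

-- one iteration of A's second loop (body of 'for event in events')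
def pvStepA (d : PySem.Dict Int (List (List (String × String))))
    (event : List (String × String)) : PySem.Dict Int (List (List (String × String))) :=
  match event.lookup "colorId" with
  | none => d
  | some c =>
      if pvBADGE_COLORS.contains c then
        let etype := pvBADGE_IDS.getD c 0
        d.modify etype [] (fun l => l ++ [event])
      else d

def get_mesa_events (events : List (List (String × String))) : List (Int × List (List (String × String))) :=
  (events.foldl pvStepA
    (pvBADGE_IDS.keys.foldl (fun d key => d.insert (pvBADGE_IDS.getD key 0) [])
      PySem.Dict.empty)).items

-- ===== PORT B =====
def pvMatches (bid : Int) (e : List (String × String)) : Bool :=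
  match e.lookup "colorId" with
  | none => false
  | some c => pvBADGE_COLORS.contains c && (pvBADGE_IDS.getD c 0 == bid)

def get_mesa_events_alt (events : List (List (String × String))) : List (Int × List (List (String × String))) :=
  pvBADGE_IDS.values.map (fun bid => (bid, events.filter (pvMatches bid)))

-- ===== PRECONDITION & SPEC =====
def Spec_get_mesa_events (events : List (List (String × String))) (out : List (Int × List (List (String × String)))) : Prop := out = get_mesa_events_alt events
instance (events : List (List (String × String))) (out : List (Int × List (List (String × String)))) : Decidable (Spec_get_mesa_events events out) := by unfold Spec_get_mesa_events; infer_instance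

-- ===== CLAIM (what is proved, stated in full; the proofs are below) =====
def Claim_equal_get_mesa_events : Prop := ∀ (events : List (List (String × String))), Dom_get_mesa_events events → Spec_get_mesa_events events (get_mesa_events events)

-- ===== LEMMAS AND PROOFS =====

-- one step of A's event loop, on a state of the invariant shape
theorem pvStepA_shape (a b c d : List (List (String × String)))
    (e : List (String × String)) :
    pvStepA (PySem.Dict.mk [(4, a), (2, b), (1, c), (3, d)]) e =
      PySem.Dict.mk [(4, a ++ (if pvMatches 4 e then [e] else [])),
                     (2, b ++ (if pvMatches 2 e then [e] else [])),
                     (1, c ++ (if pvMatches 1 e then [e] else [])),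
                     (3, d ++ (if pvMatches 3 e then [e] else []))] := by
  unfold pvStepA pvMatches
  cases h : e.lookup "colorId" with
  | none => simp
  | some col =>
      by_cases h6 : col = "6"
      · subst h6; simp [PySem.Dict.modify, PySem.Dict.insert, PySem.Dict.get?, PySem.Dict.getD, PySem.Dict.contains, pvBADGE_COLORS, pvBADGE_IDS]
      · by_cases h8 : col = "8"
        · subst h8; simp [PySem.Dict.modify, PySem.Dict.insert, PySem.Dict.get?, PySem.Dict.getD, PySem.Dict.contains, pvBADGE_COLORS, pvBADGE_IDS]
        · by_cases h9 : col = "9"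
          · subst h9; simp [PySem.Dict.modify, PySem.Dict.insert, PySem.Dict.get?, PySem.Dict.getD, PySem.Dict.contains, pvBADGE_COLORS, pvBADGE_IDS]
          · by_cases h10 : col = "10"
            · subst h10; simp [PySem.Dict.modify, PySem.Dict.insert, PySem.Dict.get?, PySem.Dict.getD, PySem.Dict.contains, pvBADGE_COLORS, pvBADGE_IDS]
            · have : pvBADGE_COLORS.contains col = false := by
                simp [pvBADGE_COLORS, PySem.Dict.contains]
                exact ⟨fun hx => h6 hx.symm, fun hx => h8 hx.symm,
                       fun hx => h9 hx.symm, fun hx => h10 hx.symm⟩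
              simp [this]

-- the whole event loop, by induction on events
theorem pvFoldA_shape (events : List (List (String × String)))
    (a b c d : List (List (String × String))) :
    events.foldl pvStepA (PySem.Dict.mk [(4, a), (2, b), (1, c), (3, d)]) =
      PySem.Dict.mk [(4, a ++ events.filter (pvMatches 4)),
                     (2, b ++ events.filter (pvMatches 2)),
                     (1, c ++ events.filter (pvMatches 1)),
                     (3, d ++ events.filter (pvMatches 3))] := by
  induction events generalizing a b c d with
  | nil => simp
  | cons e es ih =>
      rw [List.foldl_cons, pvStepA_shape, ih]
      simp [List.filter_cons]
      refine ⟨?_, ?_, ?_, ?_⟩ <;> split <;> simp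

-- ===== VERDICT (by name: the statement is the Claim_ definition above) =====
theorem get_mesa_events_spec : Claim_equal_get_mesa_events := by
  intro events _
  show get_mesa_events events = get_mesa_events_alt events
  unfold get_mesa_events get_mesa_events_alt
  have hinit : pvBADGE_IDS.keys.foldl (fun d key => d.insert (pvBADGE_IDS.getD key 0) [])
      (PySem.Dict.empty : PySem.Dict Int (List (List (String × String)))) =
      PySem.Dict.mk [(4, []), (2, []), (1, []), (3, [])] := by decide
  rw [hinit, pvFoldA_shape]
  simp [pvBADGE_IDS, PySem.Dict.values]
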